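-- pv_equiv track=rewrite | github.com/TylerZeroMaster/mtef3-to-mathml | mtef3_to_mathml/__init__.py | _unpack_partitions
-- ===== SOURCE A (Python) =====
-- PARTITION_LINE_TYPES = {0: "none", 1: "solid", 2: "dashed", 3: "dotted"}
--
-- def _unpack_partitions(raw_bytes, num_partitions):
--     """Unpacks an array of bytes into a list of 2-bit string names."""
--     partitions = []
--
--     for i in range(num_partitions):
--         # 1. Which byte is this partition in? (4 partitions per byte)
--         byte_idx = i // 4
--
--         # 2. How many bits do we shift right? (0, 2, 4, or 6)
--         bit_shift = (i % 4) * 2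
--
--         # 3. Extract the byte, shift it, and mask out everything except the
--         # bottom 2 bits
--         val = (raw_bytes[byte_idx] >> bit_shift) & 0x03
--
--         # 4. Map the integer (0-3) to its name and append it
--         partitions.append(PARTITION_LINE_TYPES.get(val, "unknown"))
--
--     return partitions
-- ===== SOURCE B (Python) =====
-- PARTITION_LINE_TYPES = {0: "none", 1: "solid", 2: "dashed", 3: "dotted"}
--
-- def _unpack_partitions(raw_bytes, num_partitions):
--     """Unpacks an array of bytes into a list of 2-bit string names."""
--     partitions = []
--     for b in raw_bytes:
--         if len(partitions) >= num_partitions: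
--             break
--         for shift in (0, 2, 4, 6):
--             if len(partitions) >= num_partitions:
--                 break
--             partitions.append(PARTITION_LINE_TYPES.get((b >> shift) & 0x03, "unknown"))
--     return partitions
-- ===== Notes on version B (the rewrite author's own statement) =====
-- stated objective: alternative
-- what changed: B iterates over the bytes themselves (outer loop per byte, inner loop over the four 2-bit slots 0/2/4/6, stopping once num_partitions names are collected) instead of A's single index loop that recomputes byte_idx = i//4 and bit_shift via division/modulo for every partition.
import Mathlib
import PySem

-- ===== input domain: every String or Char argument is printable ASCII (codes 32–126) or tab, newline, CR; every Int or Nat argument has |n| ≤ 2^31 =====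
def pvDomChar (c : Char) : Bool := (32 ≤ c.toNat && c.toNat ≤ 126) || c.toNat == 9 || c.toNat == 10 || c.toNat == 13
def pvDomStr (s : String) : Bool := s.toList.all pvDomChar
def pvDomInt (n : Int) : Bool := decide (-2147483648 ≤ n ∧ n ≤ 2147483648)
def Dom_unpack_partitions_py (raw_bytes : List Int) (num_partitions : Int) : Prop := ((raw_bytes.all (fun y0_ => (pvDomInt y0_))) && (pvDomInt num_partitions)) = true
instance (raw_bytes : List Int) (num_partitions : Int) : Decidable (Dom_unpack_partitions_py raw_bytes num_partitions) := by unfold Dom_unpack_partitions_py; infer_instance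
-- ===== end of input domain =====

-- B replaces A's index loop (byte_idx = i//4, bit_shift = (i%4)*2 per partition) by a nested
-- per-byte / per-slot loop that stops once num_partitions names are collected (objective: alternative decomposition).

-- module constant shared by both Pythons
def PARTITION_LINE_TYPES : PySem.Dict Int String :=
  PySem.Dict.ofList [(0, "none"), (1, "solid"), (2, "dashed"), (3, "dotted")]

-- ===== PORT A =====
-- Python `b >> s` with s ≥ 0 is Lean's `b >>> s.toNat`; `& 0x03` is PySem.Int.band (both Python-exact).
-- A may raise IndexError (pyGet? = none); the Option accumulator records that, Pre_ below excludes it.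
def unpack_partitions_py (raw_bytes : List Int) (num_partitions : Int) : List String :=
  ((PySem.List.pyRange 0 num_partitions 1).foldl
    (fun acc i =>
      acc.bind fun partitions =>
        (PySem.List.pyGet? raw_bytes (PySem.Int.floordiv i 4)).map fun (b : Int) =>
          partitions ++ [PySem.Dict.getD PARTITION_LINE_TYPES
            (PySem.Int.band (b >>> (PySem.Int.mod i 4 * 2).toNat) 3) "unknown"])
    (some [])).getD []

-- ===== PORT B =====
-- inner `for shift in (0, 2, 4, 6)` with its break (the guard re-checked before each append)
def unpack_partitions_py_alt_inner (num_partitions : Int) (b : Int) (partitions : List String) : List String :=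
  ([0, 2, 4, 6] : List Nat).foldl
    (fun ps (shift : Nat) =>
      if (ps.length : Int) ≥ num_partitions then ps
      else ps ++ [PySem.Dict.getD PARTITION_LINE_TYPES (PySem.Int.band (b >>> shift) 3) "unknown"])
    partitions

-- outer `for b in raw_bytes` with its break
def unpack_partitions_py_alt_loop (num_partitions : Int) : List Int → List String → List String
  | [], partitions => partitions
  | b :: rest, partitions =>
      if (partitions.length : Int) ≥ num_partitions then partitions
      else unpack_partitions_py_alt_loop num_partitions rest (unpack_partitions_py_alt_inner num_partitions b partitions)

def unpack_partitions_py_alt (raw_bytes : List Int) (num_partitions : Int) : List String :=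
  unpack_partitions_py_alt_loop num_partitions raw_bytes []

-- ===== PRECONDITION & SPEC =====
-- Pre_ excludes exactly the inputs on which A raises IndexError (a partition index beyond raw_bytes).
def Pre_unpack_partitions_py (raw_bytes : List Int) (num_partitions : Int) : Prop :=
  num_partitions ≤ 4 * raw_bytes.length

instance (raw_bytes : List Int) (num_partitions : Int) : Decidable (Pre_unpack_partitions_py raw_bytes num_partitions) := by
  unfold Pre_unpack_partitions_py; infer_instance

def pvWitness_unpack_partitions_py : List Int × Int := ([27], 4)

def Spec_unpack_partitions_py (raw_bytes : List Int) (num_partitions : Int) (out : List String) : Prop :=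
  out = unpack_partitions_py_alt raw_bytes num_partitions

instance (raw_bytes : List Int) (num_partitions : Int) (out : List String) : Decidable (Spec_unpack_partitions_py raw_bytes num_partitions out) := by
  unfold Spec_unpack_partitions_py; infer_instance

-- ===== CLAIM (what is proved, stated in full; the proofs are below) =====
def Claim_equal_unpack_partitions_py : Prop := ∀ (raw_bytes : List Int) (num_partitions : Int), Dom_unpack_partitions_py raw_bytes num_partitions → Pre_unpack_partitions_py raw_bytes num_partitions → Spec_unpack_partitions_py raw_bytes num_partitions (unpack_partitions_py raw_bytes num_partitions)

-- ===== LEMMAS AND PROOFS =====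

-- the name of one 2-bit slot
def pvSlotName (b : Int) (s : Nat) : String :=
  PySem.Dict.getD PARTITION_LINE_TYPES (PySem.Int.band (b >>> s) 3) "unknown"

-- all slot names a byte list encodes, in order
def pvAllSlots (raw : List Int) : List String :=
  raw.flatMap (fun b => [pvSlotName b 0, pvSlotName b 2, pvSlotName b 4, pvSlotName b 6])

lemma pvAllSlots_nil : pvAllSlots [] = [] := rfl

lemma pvAllSlots_cons (b : Int) (rest : List Int) :
    pvAllSlots (b :: rest) = [pvSlotName b 0, pvSlotName b 2, pvSlotName b 4, pvSlotName b 6] ++ pvAllSlots rest := rfl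

-- element k of pvAllSlots is slot k%4 of byte k/4
lemma pvAllSlots_getElem? (raw : List Int) (k : Nat) (hk : k < 4 * raw.length) :
    (pvAllSlots raw)[k]? = some (pvSlotName (raw.getD (k / 4) 0) (2 * (k % 4))) := by
  induction raw generalizing k with
  | nil => simp at hk
  | cons b rest ih =>
      by_cases h4 : k < 4
      · interval_cases k <;> simp [pvAllSlots_cons]
      · obtain ⟨k', rfl⟩ : ∃ k', k = k' + 4 := ⟨k - 4, by omega⟩
        rw [pvAllSlots_cons, List.getElem?_append_right (by simp)]
        have hlen : k' + 4 - [pvSlotName b 0, pvSlotName b 2, pvSlotName b 4, pvSlotName b 6].length = k' := by simp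
        rw [hlen, ih k' (by simp at hk; omega)]
        have h1 : (k' + 4) / 4 = k' / 4 + 1 := by omega
        have h2 : (k' + 4) % 4 = k' % 4 := by omega
        rw [h1, h2]
        rfl

-- ===== A side =====

lemma A_foldl_eq (raw : List Int) (n : Nat) (hn : n ≤ 4 * raw.length) :
    (PySem.List.pyRange 0 (n : Int) 1).foldl
      (fun acc i =>
        acc.bind fun partitions =>
          (PySem.List.pyGet? raw (PySem.Int.floordiv i 4)).map fun (b : Int) =>
            partitions ++ [PySem.Dict.getD PARTITION_LINE_TYPES
              (PySem.Int.band (b >>> (PySem.Int.mod i 4 * 2).toNat) 3) "unknown"])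
      (some []) = some ((pvAllSlots raw).take n) := by
  induction n with
  | zero => simp [PySem.List.pyRange_one_eq_nil]
  | succ n ih =>
      have hcast : ((n : Int) + 1) = ((n + 1 : Nat) : Int) := by push_cast; ring
      rw [← hcast, PySem.List.pyRange_one_succ_right (by positivity), List.foldl_append,
        ih (by omega)]
      simp only [List.foldl_cons, List.foldl_nil, Option.bind_some]
      have hdiv : PySem.Int.floordiv (n : Int) 4 = ((n / 4 : Nat) : Int) := by
        exact_mod_cast PySem.Int.floordiv_natCast n 4
      have hmod : PySem.Int.mod (n : Int) 4 = ((n % 4 : Nat) : Int) := by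
        exact_mod_cast PySem.Int.mod_natCast n 4
      have hidx : n / 4 < raw.length := by omega
      rw [hdiv, hmod, PySem.List.pyGet?_natCast, List.getElem?_eq_getElem hidx]
      simp only [Option.map_some]
      have htoNat : (((n % 4 : Nat) : Int) * 2).toNat = 2 * (n % 4) := by omega
      rw [htoNat]
      congr 1
      rw [List.take_add_one, pvAllSlots_getElem? raw n (by omega)]
      simp [pvSlotName, List.getD, List.getElem?_eq_getElem hidx]

lemma A_eq (raw : List Int) (num : Int) (h : num ≤ 4 * raw.length) :
    unpack_partitions_py raw num = (pvAllSlots raw).take num.toNat := by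
  unfold unpack_partitions_py
  by_cases hle : num ≤ 0
  · rw [PySem.List.pyRange_one_eq_nil hle]
    simp [Int.toNat_of_nonpos hle]
  · have hnum : num = ((num.toNat : Nat) : Int) := by omega
    rw [hnum, A_foldl_eq raw num.toNat (by omega)]
    rfl

-- ===== B side =====

lemma B_inner_eq (num : Int) (b : Int) (parts : List String) :
    unpack_partitions_py_alt_inner num b parts
      = parts ++ ([pvSlotName b 0, pvSlotName b 2, pvSlotName b 4, pvSlotName b 6]).take (num.toNat - parts.length) := by
  unfold unpack_partitions_py_alt_inner
  simp only [List.foldl_cons, List.foldl_nil, pvSlotName]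
  split_ifs with h1 h2 h3 h4 <;>
    simp only [List.length_append, List.length_cons, List.length_nil, Nat.cast_add, ge_iff_le] at *
  · have : num.toNat - parts.length = 0 := by omega
    simp [this]
  · have : num.toNat - parts.length = 1 := by omega
    simp [this]
  · have : num.toNat - parts.length = 2 := by omega
    simp [this]
  · have : num.toNat - parts.length = 3 := by omega
    simp [this]
  · have : 4 ≤ num.toNat - parts.length := by omega
    rw [List.take_of_length_le (by simpa using this)]
    simp

lemma B_loop_eq (num : Int) (raw : List Int) (parts : List String) :
    unpack_partitions_py_alt_loop num raw parts
      = parts ++ (pvAllSlots raw).take (num.toNat - parts.length) := by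
  induction raw generalizing parts with
  | nil => simp [unpack_partitions_py_alt_loop, pvAllSlots_nil]
  | cons b rest ih =>
      rw [unpack_partitions_py_alt_loop]
      split_ifs with h
      · have : num.toNat - parts.length = 0 := by omega
        simp [this]
      · rw [ih, B_inner_eq, pvAllSlots_cons, List.take_append, List.append_assoc]
        congr 3
        simp only [List.length_append, List.length_take, List.length_cons, List.length_nil]
        omega

lemma B_eq (raw : List Int) (num : Int) :
    unpack_partitions_py_alt raw num = (pvAllSlots raw).take num.toNat := by
  rw [unpack_partitions_py_alt, B_loop_eq]
  simp

-- ===== VERDICT (by name: the statement is the Claim_ definition above) =====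
theorem unpack_partitions_py_spec : Claim_equal_unpack_partitions_py := by
  intro raw num _ hpre
  unfold Spec_unpack_partitions_py
  rw [A_eq raw num hpre, B_eq]
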